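-- pv_equiv track=rewrite | github.com/midnightbot/leetcode_solutions | python3_solution_set2/893. Groups of Special-Equivalent Strings.py | numSpecialEquivGroups
-- ===== SOURCE A (Python) =====
-- from typing import List
--
-- def numSpecialEquivGroups(words: List[str]) -> int:
--
--     ## make the smallest word that can be made after moves on a string
--
--     def make_word(s):
--         e = []
--         o = []
--         for x in range(len(s)):
--             if x%2==0:
--                 e.append(s[x])
--             else:
--                 o.append(s[x])
--
--         e.sort()
--         o.sort()
--         return ''.join(e) + ''.join(o)
--
--     counter = set()
--     maxs = 0
--     for it in words:
--         new_word = make_word(it)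
--         counter.add(new_word)
--         #counter[new_word] = counter.get(new_word,0)+1
--         #maxs = max(maxs, counter[new_word])
--     return len(counter)
-- ===== SOURCE B (Python) =====
-- from typing import List
--
-- def numSpecialEquivGroups(words: List[str]) -> int:
--     keys = set()
--     for w in words:
--         even = [0] * 128
--         odd = [0] * 128
--         for i, ch in enumerate(w):
--             if i % 2 == 0:
--                 even[ord(ch)] += 1
--             else:
--                 odd[ord(ch)] += 1
--         keys.add((tuple(even), tuple(odd)))
--     return len(keys)
-- ===== Notes on version B (the rewrite author's own statement) =====
-- stated objective: alternative
-- what changed: The canonical key per word is built by tabulating character frequencies at even and at odd indices into two fixed-size count arrays, instead of collecting the even/odd characters into lists, comparison-sorting each and joining them into a string.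
import Mathlib
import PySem

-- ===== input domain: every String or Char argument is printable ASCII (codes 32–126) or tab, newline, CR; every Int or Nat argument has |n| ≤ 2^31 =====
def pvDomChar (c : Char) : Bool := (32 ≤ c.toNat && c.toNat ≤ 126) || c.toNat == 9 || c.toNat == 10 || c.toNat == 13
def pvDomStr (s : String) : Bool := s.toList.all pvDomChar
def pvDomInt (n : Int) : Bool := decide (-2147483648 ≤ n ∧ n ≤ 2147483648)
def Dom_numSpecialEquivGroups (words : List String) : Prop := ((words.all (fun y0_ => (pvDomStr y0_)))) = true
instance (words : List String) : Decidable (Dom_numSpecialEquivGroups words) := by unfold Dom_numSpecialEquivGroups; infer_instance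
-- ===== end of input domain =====

-- B replaces A's sort-and-join canonical key by two fixed-size even/odd character-frequency
-- count arrays per word; same distinct-group count, no per-word sorting (objective: alternative).

-- ===== PORT A =====
-- make_word: collect chars at even/odd indices, sort each, join and concatenate
-- (''.join(e) + ''.join(o) is ported as String.ofList of the concatenated char lists — exact).
def makeWord (s : String) : String :=
  let eo := (PySem.List.pyRange 0 (s.toList.length : Int) 1).foldl
    (fun (eo : List Char × List Char) x =>
      if PySem.Int.mod x 2 == 0 then (eo.1 ++ [PySem.List.pyGetD s.toList x ' '], eo.2)
      else (eo.1, eo.2 ++ [PySem.List.pyGetD s.toList x ' ']))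
    ([], [])
  String.ofList (PySem.List.sorted eo.1 (fun c => c) false ++ PySem.List.sorted eo.2 (fun c => c) false)

def numSpecialEquivGroups (words : List String) : Int :=
  ((words.foldl (fun counter it => PySem.Set.add counter (makeWord it))
      (PySem.Set.empty : PySem.Set String)).length : Int)

-- ===== PORT B =====
-- countKey: one pass over (index, char); bump even[ord ch] or odd[ord ch]
def countKey (s : String) : List Int × List Int :=
  (PySem.List.enumerate s.toList 0).foldl
    (fun (eo : List Int × List Int) p =>
      if PySem.Int.mod p.1 2 == 0 then
        (PySem.List.pySetD eo.1 (p.2.toNat : Int) (PySem.List.pyGetD eo.1 (p.2.toNat : Int) 0 + 1), eo.2)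
      else
        (eo.1, PySem.List.pySetD eo.2 (p.2.toNat : Int) (PySem.List.pyGetD eo.2 (p.2.toNat : Int) 0 + 1)))
    (List.replicate 128 0, List.replicate 128 0)

def numSpecialEquivGroups_alt (words : List String) : Int :=
  ((words.foldl (fun keys w => PySem.Set.add keys (countKey w))
      (PySem.Set.empty : PySem.Set (List Int × List Int))).length : Int)

-- ===== PRECONDITION & SPEC =====
def Spec_numSpecialEquivGroups (words : List String) (out : Int) : Prop := out = numSpecialEquivGroups_alt words
instance (words : List String) (out : Int) : Decidable (Spec_numSpecialEquivGroups words out) := by unfold Spec_numSpecialEquivGroups; infer_instance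

-- ===== CLAIM (what is proved, stated in full; the proofs are below) =====
def Claim_equal_numSpecialEquivGroups : Prop := ∀ (words : List String), Dom_numSpecialEquivGroups words → Spec_numSpecialEquivGroups words (numSpecialEquivGroups words)

-- ===== LEMMAS AND PROOFS =====

def splitEO : List Char → List Char × List Char
  | [] => ([], [])
  | c :: r => (c :: (splitEO r).2, (splitEO r).1)

lemma splitEO_len : ∀ l : List Char,
    (splitEO l).1.length = (l.length + 1) / 2 ∧ (splitEO l).2.length = l.length / 2 := by
  intro l
  induction l with
  | nil => simp [splitEO]
  | cons a r ih =>
    simp only [splitEO, List.length_cons]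
    refine ⟨?_, ?_⟩ <;> omega

lemma mod2_cases (i : Int) : PySem.Int.mod i 2 = 0 ∨ PySem.Int.mod i 2 = 1 := by
  simp [PySem.Int.mod, Int.fmod_eq_emod]; omega

lemma mod2_succ (i : Int) : PySem.Int.mod (i+1) 2 = 1 - PySem.Int.mod i 2 := by
  simp [PySem.Int.mod, Int.fmod_eq_emod]; omega

lemma foldA_eq (cs : List Char) :
    ∀ (i : Int) (e o : List Char),
    (PySem.List.enumerate cs i).foldl
      (fun (eo : List Char × List Char) p =>
        if PySem.Int.mod p.1 2 == 0 then (eo.1 ++ [p.2], eo.2) else (eo.1, eo.2 ++ [p.2]))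
      (e, o)
    = if PySem.Int.mod i 2 == 0 then (e ++ (splitEO cs).1, o ++ (splitEO cs).2)
      else (e ++ (splitEO cs).2, o ++ (splitEO cs).1) := by
  induction cs with
  | nil => intro i e o; simp [PySem.List.enumerate_nil, splitEO]
  | cons c r ih =>
    intro i e o
    rw [PySem.List.enumerate_cons]
    rcases mod2_cases i with h | h <;>
      simp only [List.foldl_cons, h, mod2_succ, ih, splitEO] <;> simp [List.append_assoc]

lemma makeWord_eq (s : String) :
    makeWord s = String.ofList (PySem.List.sorted (splitEO s.toList).1 (fun c => c) false
      ++ PySem.List.sorted (splitEO s.toList).2 (fun c => c) false) := by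
  unfold makeWord
  rw [show (PySem.List.pyRange 0 (s.toList.length : Int) 1).foldl
    (fun (eo : List Char × List Char) x =>
      if PySem.Int.mod x 2 == 0 then (eo.1 ++ [PySem.List.pyGetD s.toList x ' '], eo.2)
      else (eo.1, eo.2 ++ [PySem.List.pyGetD s.toList x ' ']))
    ([], []) = (PySem.List.enumerate s.toList 0).foldl
      (fun (eo : List Char × List Char) p =>
        if PySem.Int.mod p.1 2 == 0 then (eo.1 ++ [p.2], eo.2) else (eo.1, eo.2 ++ [p.2]))
      ([], []) from by
      rw [PySem.List.enumerate_eq_map_pyRange (d := ' '), List.foldl_map]; rfl]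
  rw [foldA_eq]
  simp [PySem.Int.mod]

def cntFrom (acc : List Int) (l : List Char) : List Int :=
  l.foldl (fun a c => PySem.List.pySetD a (c.toNat : Int) (PySem.List.pyGetD a (c.toNat : Int) 0 + 1)) acc

def cnt (l : List Char) : List Int := cntFrom (List.replicate 128 0) l

lemma foldB_eq (cs : List Char) :
    ∀ (i : Int) (ev od : List Int),
    (PySem.List.enumerate cs i).foldl
      (fun (eo : List Int × List Int) p =>
        if PySem.Int.mod p.1 2 == 0 then
          (PySem.List.pySetD eo.1 (p.2.toNat : Int) (PySem.List.pyGetD eo.1 (p.2.toNat : Int) 0 + 1), eo.2)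
        else
          (eo.1, PySem.List.pySetD eo.2 (p.2.toNat : Int) (PySem.List.pyGetD eo.2 (p.2.toNat : Int) 0 + 1)))
      (ev, od)
    = if PySem.Int.mod i 2 == 0 then (cntFrom ev (splitEO cs).1, cntFrom od (splitEO cs).2)
      else (cntFrom ev (splitEO cs).2, cntFrom od (splitEO cs).1) := by
  induction cs with
  | nil => intro i ev od; simp [PySem.List.enumerate_nil, splitEO, cntFrom]
  | cons c r ih =>
    intro i ev od
    rw [PySem.List.enumerate_cons]
    rcases mod2_cases i with h | h <;>
      simp only [List.foldl_cons, h, mod2_succ, ih, splitEO, cntFrom] <;> simp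

lemma countKey_eq (s : String) :
    countKey s = (cnt (splitEO s.toList).1, cnt (splitEO s.toList).2) := by
  unfold countKey cnt
  rw [foldB_eq]
  simp [PySem.Int.mod]

lemma cntFrom_length : ∀ (l : List Char) (acc : List Int), (cntFrom acc l).length = acc.length := by
  intro l
  induction l with
  | nil => intro acc; simp [cntFrom]
  | cons c r ih =>
    intro acc
    simp only [cntFrom, List.foldl_cons]
    rw [show (List.foldl _ _ r : List Int) = cntFrom (PySem.List.pySetD acc (c.toNat : Int) (PySem.List.pyGetD acc (c.toNat : Int) 0 + 1)) r from rfl, ih]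
    simp [PySem.List.pySetD_natCast]

lemma cntFrom_getD : ∀ (l : List Char) (acc : List Int), acc.length = 128 →
    (∀ c ∈ l, c.toNat < 128) → ∀ k : Nat, k < 128 →
    (cntFrom acc l).getD k 0 = acc.getD k 0 + (l.countP (fun c => c.toNat == k) : Int) := by
  intro l
  induction l with
  | nil => intro acc _ _ k _; simp [cntFrom]
  | cons c r ih =>
    intro acc hlen hl k hk
    have hc : c.toNat < 128 := hl c (by simp)
    simp only [cntFrom, List.foldl_cons]
    rw [show (List.foldl _ _ r : List Int) = cntFrom (PySem.List.pySetD acc (c.toNat : Int) (PySem.List.pyGetD acc (c.toNat : Int) 0 + 1)) r from rfl]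
    rw [ih _ (by simp [PySem.List.pySetD_natCast, hlen]) (fun x hx => hl x (by simp [hx])) k hk]
    simp only [PySem.List.pySetD_natCast, PySem.List.pyGetD_natCast]
    have h1 : (acc.set c.toNat (acc.getD c.toNat 0 + 1)).getD k 0
        = if k = c.toNat then acc.getD k 0 + 1 else acc.getD k 0 := by
      rw [List.getD_eq_getElem _ _ (by simp [hlen]; omega),
          List.getD_eq_getElem _ _ (by omega : k < acc.length)]
      rw [List.getElem_set]
      by_cases h : k = c.toNat
      · simp [h, List.getElem?_eq_getElem (show c.toNat < acc.length by omega)]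
      · simp [h, (Ne.symm h : c.toNat ≠ k)]
    rw [h1, List.countP_cons]
    by_cases h : k = c.toNat <;> simp [h] <;> omega

lemma splitEO_mem : ∀ (l : List Char) (c : Char),
    (c ∈ (splitEO l).1 → c ∈ l) ∧ (c ∈ (splitEO l).2 → c ∈ l) := by
  intro l
  induction l with
  | nil => simp [splitEO]
  | cons a r ih =>
    intro c
    simp only [splitEO, List.mem_cons]
    constructor
    · rintro (h | h)
      · exact Or.inl h
      · exact Or.inr ((ih c).2 h)
    · intro h; exact Or.inr ((ih c).1 h)

lemma char_toNat_inj {a b : Char} (h : a.toNat = b.toNat) : a = b := by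
  have hv : a.val = b.val := by
    have := h
    unfold Char.toNat at this
    exact UInt32.toNat_inj.mp this
  exact Char.ext hv

lemma cnt_eq_iff_perm (l m : List Char) (hl : ∀ c ∈ l, c.toNat < 128) (hm : ∀ c ∈ m, c.toNat < 128) :
    cnt l = cnt m ↔ l.Perm m := by
  constructor
  · intro h
    rw [List.perm_iff_count]
    intro c
    by_cases hc : c.toNat < 128
    · have h1 := cntFrom_getD l (List.replicate 128 0) (by simp) hl c.toNat hc
      have h2 := cntFrom_getD m (List.replicate 128 0) (by simp) hm c.toNat hc
      have hthis : (cnt l).getD c.toNat 0 = (cnt m).getD c.toNat 0 := by rw [h]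
      simp only [cnt] at hthis
      rw [h1, h2] at hthis
      have hcount : List.countP (fun x => x.toNat == c.toNat) l
          = List.countP (fun x => x.toNat == c.toNat) m := by
        simp at hthis; omega
      have hcp : ∀ (ll : List Char), List.countP (fun x => x.toNat == c.toNat) ll = ll.count c := by
        intro ll
        rw [List.count_eq_countP]
        apply List.countP_congr
        intro x _
        constructor
        · intro hx; simp at hx ⊢; exact char_toNat_inj hx
        · intro hx; simp at hx ⊢; rw [hx]
      rw [hcp l, hcp m] at hcount
      exact hcount
    · rw [List.count_eq_zero.mpr (fun hmem => hc (hl c hmem)),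
          List.count_eq_zero.mpr (fun hmem => hc (hm c hmem))]
  · intro hp
    have hlen1 : (cnt l).length = 128 := by rw [cnt, cntFrom_length]; simp
    have hlen2 : (cnt m).length = 128 := by rw [cnt, cntFrom_length]; simp
    apply List.ext_getElem (by omega)
    intro k hk1 hk2
    have hk : k < 128 := by omega
    have h1 := cntFrom_getD l (List.replicate 128 0) (by simp) hl k hk
    have h2 := cntFrom_getD m (List.replicate 128 0) (by simp) hm k hk
    have e1 : (cnt l)[k] = (cnt l).getD k 0 := (List.getD_eq_getElem _ _ hk1).symm
    have e2 : (cnt m)[k] = (cnt m).getD k 0 := (List.getD_eq_getElem _ _ hk2).symm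
    rw [e1, e2]
    simp only [cnt]
    rw [h1, h2, hp.countP_eq]

lemma key_iff (s t : String) (hs : ∀ c ∈ s.toList, c.toNat < 128)
    (ht : ∀ c ∈ t.toList, c.toNat < 128) :
    (makeWord s = makeWord t) ↔ (countKey s = countKey t) := by
  have hsE : ∀ c ∈ (splitEO s.toList).1, c.toNat < 128 :=
    fun c hc => hs c ((splitEO_mem s.toList c).1 hc)
  have hsO : ∀ c ∈ (splitEO s.toList).2, c.toNat < 128 :=
    fun c hc => hs c ((splitEO_mem s.toList c).2 hc)
  have htE : ∀ c ∈ (splitEO t.toList).1, c.toNat < 128 :=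
    fun c hc => ht c ((splitEO_mem t.toList c).1 hc)
  have htO : ∀ c ∈ (splitEO t.toList).2, c.toNat < 128 :=
    fun c hc => ht c ((splitEO_mem t.toList c).2 hc)
  rw [makeWord_eq, makeWord_eq, countKey_eq, countKey_eq]
  constructor
  · intro h
    have hlists : PySem.List.sorted (splitEO s.toList).1 (fun c => c) false
        ++ PySem.List.sorted (splitEO s.toList).2 (fun c => c) false
        = PySem.List.sorted (splitEO t.toList).1 (fun c => c) false
        ++ PySem.List.sorted (splitEO t.toList).2 (fun c => c) false := by
      have := congrArg String.toList h
      simpa using this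
    have hn : s.toList.length = t.toList.length := by
      have hls := congrArg List.length hlists
      rw [List.length_append, List.length_append, PySem.List.length_sorted,
        PySem.List.length_sorted, PySem.List.length_sorted, PySem.List.length_sorted,
        (splitEO_len s.toList).1, (splitEO_len s.toList).2,
        (splitEO_len t.toList).1, (splitEO_len t.toList).2] at hls
      omega
    have hfstlen : (PySem.List.sorted (splitEO s.toList).1 (fun c => c) false).length
        = (PySem.List.sorted (splitEO t.toList).1 (fun c => c) false).length := by
      rw [PySem.List.length_sorted, PySem.List.length_sorted,
        (splitEO_len s.toList).1, (splitEO_len t.toList).1, hn]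
    obtain ⟨hE, hO⟩ := List.append_inj hlists hfstlen
    have hpE : (splitEO s.toList).1.Perm (splitEO t.toList).1 :=
      (PySem.List.sorted_id_eq_sorted_id_iff_perm _ _).mp hE
    have hpO : (splitEO s.toList).2.Perm (splitEO t.toList).2 :=
      (PySem.List.sorted_id_eq_sorted_id_iff_perm _ _).mp hO
    rw [Prod.ext_iff]
    exact ⟨(cnt_eq_iff_perm _ _ hsE htE).mpr hpE, (cnt_eq_iff_perm _ _ hsO htO).mpr hpO⟩
  · intro h
    rw [Prod.ext_iff] at h
    have hpE := (cnt_eq_iff_perm _ _ hsE htE).mp h.1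
    have hpO := (cnt_eq_iff_perm _ _ hsO htO).mp h.2
    rw [(PySem.List.sorted_id_eq_sorted_id_iff_perm _ _).mpr hpE,
        (PySem.List.sorted_id_eq_sorted_id_iff_perm _ _).mpr hpO]

lemma len_ofList_map_congr {α β γ : Type} [BEq β] [LawfulBEq β] [BEq γ] [LawfulBEq γ]
    (f : α → β) (g : α → γ) :
    ∀ (l : List α),
    (∀ x ∈ l, ∀ y ∈ l, (f x = f y ↔ g x = g y)) →
    (PySem.Set.ofList (l.map f)).length = (PySem.Set.ofList (l.map g)).length := by
  intro l
  induction l using List.reverseRecOn with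
  | nil => simp
  | append_singleton l a ih =>
    intro h
    have hsub : ∀ x ∈ l, ∀ y ∈ l, (f x = f y ↔ g x = g y) :=
      fun x hx y hy => h x (by simp [hx]) y (by simp [hy])
    rw [List.map_append, List.map_append, List.map_singleton, List.map_singleton,
      PySem.Set.ofList_append_singleton, PySem.Set.ofList_append_singleton,
      PySem.Set.add_eq_ite, PySem.Set.add_eq_ite]
    have hmem : (f a ∈ PySem.Set.ofList (l.map f)) ↔ (g a ∈ PySem.Set.ofList (l.map g)) := by
      rw [PySem.Set.mem_ofList, PySem.Set.mem_ofList, List.mem_map, List.mem_map]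
      constructor
      · rintro ⟨x, hx, hfx⟩
        exact ⟨x, hx, (h x (by simp [hx]) a (by simp)).mp hfx⟩
      · rintro ⟨x, hx, hgx⟩
        exact ⟨x, hx, (h x (by simp [hx]) a (by simp)).mpr hgx⟩
    by_cases hf : f a ∈ PySem.Set.ofList (l.map f)
    · rw [if_pos hf, if_pos (hmem.mp hf)]
      exact ih hsub
    · rw [if_neg hf, if_neg (fun hg => hf (hmem.mpr hg))]
      simp [ih hsub]


-- ===== VERDICT =====
theorem numSpecialEquivGroups_spec : Claim_equal_numSpecialEquivGroups := by
  unfold Claim_equal_numSpecialEquivGroups Spec_numSpecialEquivGroups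

  intro words hdom
  unfold numSpecialEquivGroups numSpecialEquivGroups_alt
  rw [← PySem.Set.update_map_eq_foldl_add, ← PySem.Set.update_map_eq_foldl_add,
    PySem.Set.update_empty, PySem.Set.update_empty]
  have hchars : ∀ w ∈ words, ∀ c ∈ w.toList, c.toNat < 128 := by
    intro w hw c hc
    have h1 : pvDomStr w = true := by
      unfold Dom_numSpecialEquivGroups at hdom
      rw [List.all_eq_true] at hdom
      exact hdom w hw
    unfold pvDomStr at h1
    rw [List.all_eq_true] at h1
    have := h1 c hc
    unfold pvDomChar at this
    simp at this
    omega
  congr 1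
  exact len_ofList_map_congr makeWord countKey words
    (fun x hx y hy => key_iff x y (hchars x hx) (hchars y hy))
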